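-- pv_equiv track=rewrite | github.com/lupusludensest/algorithms | code_challenge_ CodeSignal_PayPay_Corpdt_21_nov_2023.py | solution
-- ===== SOURCE A (Python) =====
-- def solution(words, variableName):
--     parts = []
--     current_word = ''
--
--     for char in variableName:
--         if char.islower():
--             current_word += char
--         else:
--             if current_word:
--                 parts.append(current_word)
--             current_word = char
--
--     if current_word:
--         parts.append(current_word)
--
--     for part in parts:
--         if part.lower() not in words:
--             return False
--
--     return True
-- ===== SOURCE B (Python) =====
-- def solution(words, variableName):
--     s = variableName
--     n = len(s)
--     i = 0
--     while i < n:
--         j = i + 1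
--         while j < n and s[j].islower():
--             j += 1
--         if s[i:j].lower() not in words:
--             return False
--         i = j
--     return True
-- ===== Notes on version B (the rewrite author's own statement) =====
-- stated objective: alternative
-- what changed: Replaces A's accumulator-string/parts-list scan plus a second membership loop with a single two-pointer index scan that slices each chunk directly and exits early per chunk, building no intermediate list.
import Mathlib
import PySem

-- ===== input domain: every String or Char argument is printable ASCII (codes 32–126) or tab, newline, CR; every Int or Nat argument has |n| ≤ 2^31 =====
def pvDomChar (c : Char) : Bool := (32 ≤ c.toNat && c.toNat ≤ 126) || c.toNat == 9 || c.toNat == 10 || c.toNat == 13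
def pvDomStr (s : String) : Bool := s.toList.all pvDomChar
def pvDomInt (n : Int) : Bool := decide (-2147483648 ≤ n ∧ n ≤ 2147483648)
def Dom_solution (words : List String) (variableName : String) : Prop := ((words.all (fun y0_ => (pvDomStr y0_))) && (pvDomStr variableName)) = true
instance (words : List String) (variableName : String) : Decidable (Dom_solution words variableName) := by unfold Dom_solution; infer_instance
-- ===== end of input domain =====

-- B replaces the accumulator/parts-list scan by a two-pointer chunk scan with early exit; same cost, no intermediate list.

-- ===== PORT A =====
-- one step of A's for-loop over the characters: state = (parts, current_word)
def solStep (st : List (List Char) × List Char) (c : Char) : List (List Char) × List Char :=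
  if PySem.Chars.islower c then (st.1, st.2 ++ [c])
  else (if st.2.isEmpty then st.1 else st.1 ++ [st.2], [c])

-- the trailing 'if current_word: parts.append(current_word)'
def solFinalize (st : List (List Char) × List Char) : List (List Char) :=
  if st.2.isEmpty then st.1 else st.1 ++ [st.2]

-- the second for-loop with its early 'return False'
def solCheck (ws : List (List Char)) : List (List Char) → Bool
  | [] => true
  | p :: rest => if ws.contains (PySem.Chars.lower p) then solCheck ws rest else false

def solution (words : List String) (variableName : String) : Bool :=
  solCheck (words.map String.toList)
    (solFinalize (variableName.toList.foldl solStep ([], [])))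

-- ===== PORT B =====
-- B's outer while loop: s[i:j] is c :: (lowercase run after it); i = j is the dropWhile
def altGo (ws : List (List Char)) : List Char → Bool
  | [] => true
  | c :: rest =>
      if ws.contains (PySem.Chars.lower (c :: rest.takeWhile PySem.Chars.islower)) then
        altGo ws (rest.dropWhile PySem.Chars.islower)
      else false
termination_by cs => cs.length
decreasing_by
  simpa using Nat.lt_succ_of_le (List.length_dropWhile_le _ _)

def solution_alt (words : List String) (variableName : String) : Bool :=
  altGo (words.map String.toList) variableName.toList

-- ===== PRECONDITION & SPEC =====
def Spec_solution (words : List String) (variableName : String) (out : Bool) : Prop := out = solution_alt words variableName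
instance (words : List String) (variableName : String) (out : Bool) : Decidable (Spec_solution words variableName out) := by unfold Spec_solution; infer_instance

-- ===== CLAIM (what is proved, stated in full; the proofs are below) =====
def Claim_equal_solution : Prop := ∀ (words : List String) (variableName : String), Dom_solution words variableName → Spec_solution words variableName (solution words variableName)

-- ===== LEMMAS AND PROOFS =====

-- proof-only: A's parts as a direct recursion with pending (nonempty) current word
def partsFrom (cur : List Char) : List Char → List (List Char)
  | [] => [cur]
  | c :: rest =>
      if PySem.Chars.islower c then partsFrom (cur ++ [c]) rest
      else cur :: partsFrom [c] rest

theorem finalize_foldl (cs : List Char) :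
    ∀ (parts : List (List Char)) (cur : List Char), cur ≠ [] →
      solFinalize (cs.foldl solStep (parts, cur)) = parts ++ partsFrom cur cs := by
  induction cs with
  | nil =>
      intro parts cur h
      simp [solFinalize, partsFrom, h]
  | cons c rest ih =>
      intro parts cur h
      by_cases hc : PySem.Chars.islower c
      · simp only [List.foldl_cons, solStep, hc, if_pos, partsFrom]
        exact ih parts (cur ++ [c]) (by simp)
      · simp only [List.foldl_cons, solStep, hc, partsFrom, List.isEmpty_iff, h,
          Bool.false_eq_true, reduceIte]
        rw [ih (parts ++ [cur]) [c] (by simp)]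
        simp

theorem check_partsFrom (ws : List (List Char)) (cs : List Char) :
    ∀ (cur : List Char),
      solCheck ws (partsFrom cur cs) =
        (if ws.contains (PySem.Chars.lower (cur ++ cs.takeWhile PySem.Chars.islower)) then
          altGo ws (cs.dropWhile PySem.Chars.islower) else false) := by
  induction cs with
  | nil =>
      intro cur
      simp [partsFrom, solCheck, altGo]
  | cons c rest ih =>
      intro cur
      by_cases hc : PySem.Chars.islower c
      · simp only [partsFrom, hc, if_pos, List.takeWhile_cons, List.dropWhile_cons]
        rw [ih (cur ++ [c])]
        simp
      · simp only [partsFrom, hc, List.takeWhile_cons, List.dropWhile_cons, if_false,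
          Bool.false_eq_true, solCheck, List.append_nil]
        rw [ih [c]]
        conv_rhs => rw [altGo]
        simp

theorem solution_spec : Claim_equal_solution := by
  intro words variableName _
  unfold Spec_solution solution solution_alt
  cases hv : variableName.toList with
  | nil => simp [solFinalize, solCheck, altGo]
  | cons c rest =>
      have hstep : solStep ([], []) c = ([], [c]) := by
        simp [solStep]
      rw [List.foldl_cons, hstep,
        finalize_foldl rest [] [c] (by simp),
        List.nil_append,
        check_partsFrom (words.map String.toList) rest [c]]
      conv_rhs => rw [altGo]
      simp
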